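-- pv_equiv track=rewrite | github.com/kikompakt/kiki | chat_orchestrator.py | _extract_course_description
-- ===== SOURCE A (Python) =====
-- def _extract_course_description(content: str) -> str:
--     """Extract course description from content"""
--     lines = content.split('\n')
--     description_lines = []
--
--     # Look for description after title
--     found_title = False
--     for line in lines:
--         line = line.strip()
--         if not line:
--             continue
--         if not found_title and (line.startswith('#') or line.startswith('**')):
--             found_title = True
--             continue
--         if found_title and len(description_lines) < 3:
--             if not line.startswith('#') and not line.startswith('**'):
--                 description_lines.append(line)
--             else:
--                 break
--
--     return ' '.join(description_lines)[:500] if description_lines else "KI-generierter Kurs"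
-- ===== SOURCE B (Python) =====
-- def _extract_course_description(content: str) -> str:
--     """Extract course description from content"""
--     cleaned = [s for s in (line.strip() for line in content.split('\n')) if s]
--
--     def is_header(s):
--         return s.startswith('#') or s.startswith('**')
--
--     idx = next((i for i, s in enumerate(cleaned) if is_header(s)), None)
--     if idx is None:
--         return "KI-generierter Kurs"
--     tail = cleaned[idx + 1:]
--     stop = next((j for j, s in enumerate(tail) if is_header(s)), len(tail))
--     desc = tail[:min(stop, 3)]
--     return ' '.join(desc)[:500] if desc else "KI-generierter Kurs"
-- ===== Notes on version B (the rewrite author's own statement) =====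
-- stated objective: simpler
-- what changed: Replaces A's single stateful loop (found_title flag, bounded append, break) by a declarative decomposition: strip and filter the lines, locate the first markdown-header line by index, then slice out at most three following lines up to the next header.
import Mathlib
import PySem

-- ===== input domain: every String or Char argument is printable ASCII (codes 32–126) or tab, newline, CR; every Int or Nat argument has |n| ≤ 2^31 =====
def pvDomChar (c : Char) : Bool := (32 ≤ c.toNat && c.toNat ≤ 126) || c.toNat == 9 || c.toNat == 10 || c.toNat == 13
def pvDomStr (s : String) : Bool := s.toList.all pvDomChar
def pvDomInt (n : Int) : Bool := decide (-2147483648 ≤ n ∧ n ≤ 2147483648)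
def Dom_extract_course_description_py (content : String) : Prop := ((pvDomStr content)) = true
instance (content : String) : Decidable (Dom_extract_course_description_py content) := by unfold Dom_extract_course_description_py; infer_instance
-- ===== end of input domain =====

-- B replaces A's stateful found_title/append loop by a clean/filter + first-header-index +
-- slice decomposition (objective: simpler); same return value on every input.

-- ===== PORT A =====
-- the for-loop of A, state = (found_title, description_lines)
def pvA_loop : List String → Bool → List String → List String
  | [], _, acc => acc
  | l :: rest, ft, acc =>
    let line := PySem.Str.strip l
    if line = "" then pvA_loop rest ft acc
    else if !ft && (PySem.Str.startswith line "#" || PySem.Str.startswith line "**") then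
      pvA_loop rest true acc
    else if ft && acc.length < 3 then
      if !PySem.Str.startswith line "#" && !PySem.Str.startswith line "**" then
        pvA_loop rest ft (acc ++ [line])
      else acc  -- break
    else pvA_loop rest ft acc

def extract_course_description_py (content : String) : String :=
  let lines := (PySem.Str.split? content "\n").getD []
  let description_lines := pvA_loop lines false []
  if description_lines ≠ [] then
    PySem.Str.slice (PySem.Str.join " " description_lines) none (some 500)
  else "KI-generierter Kurs"

-- ===== PORT B =====
def pvIsHeader (s : String) : Bool :=
  PySem.Str.startswith s "#" || PySem.Str.startswith s "**"

def extract_course_description_py_alt (content : String) : String :=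
  let cleaned := (((PySem.Str.split? content "\n").getD []).map PySem.Str.strip).filter (fun s => s ≠ "")
  match cleaned.findIdx? pvIsHeader with
  | none => "KI-generierter Kurs"
  | some idx =>
    let tail := cleaned.drop (idx + 1)
    let stop := (tail.findIdx? pvIsHeader).getD tail.length
    let desc := tail.take (min stop 3)
    if desc ≠ [] then
      PySem.Str.slice (PySem.Str.join " " desc) none (some 500)
    else "KI-generierter Kurs"

-- ===== PRECONDITION & SPEC =====
def Spec_extract_course_description_py (content : String) (out : String) : Prop := out = extract_course_description_py_alt content
instance (content : String) (out : String) : Decidable (Spec_extract_course_description_py content out) := by unfold Spec_extract_course_description_py; infer_instance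

-- ===== CLAIM (what is proved, stated in full; the proofs are below) =====
def Claim_equal_extract_course_description_py : Prop := ∀ (content : String), Dom_extract_course_description_py content → Spec_extract_course_description_py content (extract_course_description_py content)

-- ===== LEMMAS AND PROOFS =====

-- A's loop on the cleaned (stripped, non-empty) lines
def pvA_clean : List String → Bool → List String → List String
  | [], _, acc => acc
  | l :: rest, ft, acc =>
    if !ft && pvIsHeader l then pvA_clean rest true acc
    else if ft && acc.length < 3 then
      if !pvIsHeader l then pvA_clean rest ft (acc ++ [l]) else acc
    else pvA_clean rest ft acc

theorem pvA_loop_eq_clean (ls : List String) (ft : Bool) (acc : List String) :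
    pvA_loop ls ft acc = pvA_clean ((ls.map PySem.Str.strip).filter (fun s => s ≠ "")) ft acc := by
  induction ls generalizing ft acc with
  | nil => rfl
  | cons l rest ih =>
    simp only [pvA_loop, List.map_cons, List.filter_cons]
    by_cases h : PySem.Str.strip l = "" <;>
      simp [h, pvA_clean, pvIsHeader, ih]

theorem pvA_clean_true (cs : List String) (acc : List String) :
    pvA_clean cs true acc
      = acc ++ (cs.takeWhile (fun s => !pvIsHeader s)).take (3 - acc.length) := by
  induction cs generalizing acc with
  | nil => simp [pvA_clean]
  | cons l rest ih =>
    simp only [pvA_clean, List.takeWhile]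
    by_cases hlen : acc.length < 3
    · by_cases hh : pvIsHeader l
      · simp [hh, hlen]
      · have h3 : 3 - acc.length = (2 - acc.length) + 1 := by omega
        simp [hh, hlen, ih, h3, List.take_succ_cons]
    · have h0 : 3 - acc.length = 0 := by omega
      by_cases hh : pvIsHeader l <;> simp [hh, hlen, ih, h0]

theorem pvA_clean_false (cs : List String) (acc : List String) :
    pvA_clean cs false acc
      = match cs.findIdx? pvIsHeader with
        | none => acc
        | some i => pvA_clean (cs.drop (i + 1)) true acc := by
  induction cs with
  | nil => rfl
  | cons l rest ih =>
    by_cases hh : pvIsHeader l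
    · simp [pvA_clean, hh, List.findIdx?_cons]
    · simp only [pvA_clean, hh, Bool.not_false, Bool.and_false, Bool.false_and, if_false, if_true, ih, List.findIdx?_cons, Bool.false_eq_true]
      cases h : rest.findIdx? pvIsHeader <;> simp

theorem pv_takeWhile_eq_take_stop (cs : List String) :
    cs.takeWhile (fun s => !pvIsHeader s)
      = cs.take ((cs.findIdx? pvIsHeader).getD cs.length) := by
  induction cs with
  | nil => rfl
  | cons l rest ih =>
    by_cases hh : pvIsHeader l
    · simp [List.takeWhile, hh, List.findIdx?_cons]
    · simp [List.takeWhile, hh, List.findIdx?_cons, ih]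

-- ===== VERDICT (by name: the statement is the Claim_ definition above) =====
theorem extract_course_description_py_spec : Claim_equal_extract_course_description_py := by
  intro content _
  unfold Spec_extract_course_description_py
  unfold extract_course_description_py extract_course_description_py_alt
  simp only [pvA_loop_eq_clean, pvA_clean_false]
  cases h : ((((PySem.Str.split? content "\n").getD []).map PySem.Str.strip).filter
      (fun s => s ≠ "")).findIdx? pvIsHeader with
  | none => simp
  | some i =>
    simp only [pvA_clean_true, pv_takeWhile_eq_take_stop, List.nil_append,
      List.take_take, Nat.min_comm, List.length_nil, Nat.sub_zero]
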